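-- pv_equiv track=rewrite | github.com/gupta1123/socialmedia1 | services/socialpython/compiler/archive_notebook_bridge.py | choose_ad_project_library_asset
-- ===== SOURCE A (Python) =====
-- from typing import Any, Callable, Dict, List, Optional
--
-- def choose_ad_project_library_asset(
--     available_assets: list[dict[str, Any]],
--     commercial_hook: str,
-- ) -> dict[str, Any] | None:
--     if not available_assets:
--         return None
--
--     priority_by_hook = {
--         "amenity": ["amenity", "sales_gallery", "main_building_exterior", "aerial_view"],
--         "visit": ["sales_gallery", "entrance_gate", "main_building_exterior", "aerial_view"],
--         "location": ["aerial_view", "entrance_gate", "main_building_exterior", "sales_gallery"],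
--         "price": ["main_building_exterior", "aerial_view", "entrance_gate", "sales_gallery", "amenity"],
--         "configuration": ["main_building_exterior", "aerial_view", "sales_gallery", "amenity"],
--         "offer": ["main_building_exterior", "aerial_view", "entrance_gate", "sales_gallery", "amenity"],
--         "investment": ["aerial_view", "main_building_exterior", "entrance_gate", "sales_gallery"],
--         "trust": ["main_building_exterior", "sales_gallery", "entrance_gate", "aerial_view", "amenity"],
--         "compliance": ["main_building_exterior", "sales_gallery", "entrance_gate", "aerial_view", "amenity"],
--         "credibility": ["main_building_exterior", "sales_gallery", "entrance_gate", "aerial_view", "amenity"],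
--     }
--     priorities = priority_by_hook.get(commercial_hook, priority_by_hook["offer"])
--
--     def category_score(category: str) -> int:
--         normalized = str(category or "").strip().lower()
--         for index, token in enumerate(priorities):
--             if token in normalized:
--                 return index
--         return len(priorities) + 1
--
--     ranked = sorted(
--         [asset for asset in available_assets if isinstance(asset, dict)],
--         key=lambda asset: (
--             category_score(str(asset.get("category") or "")),
--             str(asset.get("category") or ""),
--             str(asset.get("filename") or ""),
--         ),
--     )
--     return ranked[0] if ranked else None
-- ===== SOURCE B (Python) =====
-- def choose_ad_project_library_asset(available_assets, commercial_hook):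
--     if not available_assets:
--         return None
--
--     priority_by_hook = {
--         "amenity": ["amenity", "sales_gallery", "main_building_exterior", "aerial_view"],
--         "visit": ["sales_gallery", "entrance_gate", "main_building_exterior", "aerial_view"],
--         "location": ["aerial_view", "entrance_gate", "main_building_exterior", "sales_gallery"],
--         "price": ["main_building_exterior", "aerial_view", "entrance_gate", "sales_gallery", "amenity"],
--         "configuration": ["main_building_exterior", "aerial_view", "sales_gallery", "amenity"],
--         "offer": ["main_building_exterior", "aerial_view", "entrance_gate", "sales_gallery", "amenity"],
--         "investment": ["aerial_view", "main_building_exterior", "entrance_gate", "sales_gallery"],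
--         "trust": ["main_building_exterior", "sales_gallery", "entrance_gate", "aerial_view", "amenity"],
--         "compliance": ["main_building_exterior", "sales_gallery", "entrance_gate", "aerial_view", "amenity"],
--         "credibility": ["main_building_exterior", "sales_gallery", "entrance_gate", "aerial_view", "amenity"],
--     }
--     priorities = priority_by_hook.get(commercial_hook, priority_by_hook["offer"])
--
--     def category_score(category):
--         normalized = str(category or "").strip().lower()
--         for index, token in enumerate(priorities):
--             if token in normalized:
--                 return index
--         return len(priorities) + 1
--
--     candidates = [asset for asset in available_assets if isinstance(asset, dict)]
--     for rank in list(range(len(priorities))) + [len(priorities) + 1]: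
--         bucket = [
--             asset for asset in candidates
--             if category_score(str(asset.get("category") or "")) == rank
--         ]
--         if bucket:
--             return min(
--                 bucket,
--                 key=lambda asset: (str(asset.get("category") or ""), str(asset.get("filename") or "")),
--             )
--     return None
-- ===== Notes on version B (the rewrite author's own statement) =====
-- stated objective: alternative
-- what changed: Replaces A's single global sort of all assets by a composite (score, category, filename) key with an outer loop over priority ranks in increasing order that returns the min by (category, filename) of the first non-empty rank bucket.
import Mathlib
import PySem

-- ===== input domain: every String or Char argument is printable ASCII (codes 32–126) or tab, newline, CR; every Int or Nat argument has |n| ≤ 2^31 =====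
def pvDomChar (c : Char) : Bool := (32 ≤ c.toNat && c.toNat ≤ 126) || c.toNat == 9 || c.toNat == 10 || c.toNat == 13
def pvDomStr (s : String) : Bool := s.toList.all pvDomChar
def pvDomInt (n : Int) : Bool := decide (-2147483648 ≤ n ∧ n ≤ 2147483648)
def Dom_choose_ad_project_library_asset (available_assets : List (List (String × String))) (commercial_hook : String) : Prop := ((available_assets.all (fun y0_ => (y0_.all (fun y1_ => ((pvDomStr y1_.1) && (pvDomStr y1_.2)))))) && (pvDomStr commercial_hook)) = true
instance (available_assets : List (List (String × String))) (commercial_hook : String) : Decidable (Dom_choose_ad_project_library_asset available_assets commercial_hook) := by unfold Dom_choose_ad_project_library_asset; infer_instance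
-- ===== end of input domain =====

-- B replaces A's single global sort by a composite key with an outer pass over priority ranks
-- and an in-bucket min (same result, different decomposition; objective: alternative).

-- ===== PORT A =====
-- priority_by_hook (shared by both ports, exactly as in both Python sources)
def pvPriorityByHook : PySem.Dict String (List String) := ⟨[
  ("amenity", ["amenity", "sales_gallery", "main_building_exterior", "aerial_view"]),
  ("visit", ["sales_gallery", "entrance_gate", "main_building_exterior", "aerial_view"]),
  ("location", ["aerial_view", "entrance_gate", "main_building_exterior", "sales_gallery"]),
  ("price", ["main_building_exterior", "aerial_view", "entrance_gate", "sales_gallery", "amenity"]),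
  ("configuration", ["main_building_exterior", "aerial_view", "sales_gallery", "amenity"]),
  ("offer", ["main_building_exterior", "aerial_view", "entrance_gate", "sales_gallery", "amenity"]),
  ("investment", ["aerial_view", "main_building_exterior", "entrance_gate", "sales_gallery"]),
  ("trust", ["main_building_exterior", "sales_gallery", "entrance_gate", "aerial_view", "amenity"]),
  ("compliance", ["main_building_exterior", "sales_gallery", "entrance_gate", "aerial_view", "amenity"]),
  ("credibility", ["main_building_exterior", "sales_gallery", "entrance_gate", "aerial_view", "amenity"])]⟩

-- priority_by_hook.get(commercial_hook, priority_by_hook["offer"])  ("offer" is present, getD [] never fires)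
def pvPriorities (hook : String) : List String :=
  match PySem.Dict.get? pvPriorityByHook hook with
  | some p => p
  | none => (PySem.Dict.get? pvPriorityByHook "offer").getD []

-- str(asset.get(k) or "") : missing key or "" value → "" (values are already str)
def pvGetS (asset : List (String × String)) (k : String) : String :=
  (PySem.Dict.get? (⟨asset⟩ : PySem.Dict String String) k).getD ""

-- category_score (identical helper in both Python sources)
def pvCategoryScore (priorities : List String) (category : String) : Int :=
  let normalized := PySem.Str.lower (PySem.Str.strip category)
  match (PySem.List.enumerate priorities).find? (fun p => PySem.Str.isIn p.2 normalized) with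
  | some p => p.1
  | none => (priorities.length : Int) + 1

-- hand port (comment: exact) of Python's lexicographic comparison of the 3-tuple sort key
-- (category_score, category, filename): tuple u < v iff first differing component is smaller
def pvTupleLt (priorities : List String) (a b : List (String × String)) : Bool :=
  decide (pvCategoryScore priorities (pvGetS a "category") <
            pvCategoryScore priorities (pvGetS b "category")) ||
  (decide (pvCategoryScore priorities (pvGetS a "category") =
             pvCategoryScore priorities (pvGetS b "category")) &&
    (decide (pvGetS a "category" < pvGetS b "category") ||
      (decide (pvGetS a "category" = pvGetS b "category") &&
        decide (pvGetS a "filename" < pvGetS b "filename"))))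

-- under the type convention every asset IS a dict, so the isinstance filter keeps everything
def choose_ad_project_library_asset (available_assets : List (List (String × String))) (commercial_hook : String) : Option (List (String × String)) :=
  if available_assets = [] then none
  else
    let priorities := pvPriorities commercial_hook
    -- sorted(assets, key=3-tuple): hand port of Python's stable sort, exact — it is the
    -- stable insertion sort PySem.List.sorted performs, with the tuple-key '<' written out
    let ranked := available_assets.foldl
      (fun acc x => PySem.List.insertBy (pvTupleLt priorities) x acc) []
    ranked.head?   -- ranked[0] if ranked else None

-- ===== PORT B =====
-- for rank in list(range(len(priorities))) + [len(priorities)+1]: first non-empty bucket wins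
def pvBucketLoop (priorities : List String) (candidates : List (List (String × String))) :
    List Int → Option (List (String × String))
  | [] => none
  | r :: rs =>
    let bucket := candidates.filter
      (fun a => pvCategoryScore priorities (pvGetS a "category") == r)
    if bucket.isEmpty then pvBucketLoop priorities candidates rs
    else PySem.List.min2? bucket (fun a => pvGetS a "category") (fun a => pvGetS a "filename")

def choose_ad_project_library_asset_alt (available_assets : List (List (String × String))) (commercial_hook : String) : Option (List (String × String)) :=
  if available_assets = [] then none
  else
    let priorities := pvPriorities commercial_hook
    pvBucketLoop priorities available_assets
      (PySem.List.pyRange 0 (priorities.length : Int) ++ [(priorities.length : Int) + 1])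

-- ===== PRECONDITION & SPEC =====
def Spec_choose_ad_project_library_asset (available_assets : List (List (String × String))) (commercial_hook : String) (out : Option (List (String × String))) : Prop := out = choose_ad_project_library_asset_alt available_assets commercial_hook
instance (available_assets : List (List (String × String))) (commercial_hook : String) (out : Option (List (String × String))) : Decidable (Spec_choose_ad_project_library_asset available_assets commercial_hook out) := by unfold Spec_choose_ad_project_library_asset; infer_instance

-- ===== CLAIM (what is proved, stated in full; the proofs are below) =====
def Claim_equal_choose_ad_project_library_asset : Prop := ∀ (available_assets : List (List (String × String))) (commercial_hook : String), Dom_choose_ad_project_library_asset available_assets commercial_hook → Spec_choose_ad_project_library_asset available_assets commercial_hook (choose_ad_project_library_asset available_assets commercial_hook)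

-- ===== LEMMAS AND PROOFS =====

theorem pv_head?_insertBy {α : Type} (before : α → α → Bool) (x : α) (l : List α) :
    (PySem.List.insertBy before x l).head? =
      some (match l with | [] => x | y :: _ => if before x y then x else y) := by
  cases l with
  | nil => simp [PySem.List.insertBy]
  | cons y ys => simp only [PySem.List.insertBy]; split <;> simp

theorem pv_foldl_insertBy_head? {α : Type} (before : α → α → Bool) :
    ∀ (xs : List α) (acc : List α),
      (xs.foldl (fun a x => PySem.List.insertBy before x a) acc).head? =
        xs.foldl (fun o x => match o with
          | none => some x
          | some m => if before x m then some x else some m) acc.head? := by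
  intro xs
  induction xs with
  | nil => intro acc; rfl
  | cons x t ih =>
    intro acc
    simp only [List.foldl_cons]
    rw [ih]
    congr 1
    rw [pv_head?_insertBy]
    cases acc with
    | nil => rfl
    | cons y ys => simp only [List.head?]; split <;> rfl

-- abbreviations used only by the proofs below
def pvS (pr : List String) (a : List (String × String)) : Int :=
  pvCategoryScore pr (pvGetS a "category")
def pvC (a : List (String × String)) : String := pvGetS a "category"
def pvF (a : List (String × String)) : String := pvGetS a "filename"

-- the composite key as a lexicographic triple (proof-side only)
def pvKey (priorities : List String) (asset : List (String × String)) :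
    Lex (Int × Lex (String × String)) :=
  toLex (pvCategoryScore priorities (pvGetS asset "category"),
         toLex (pvGetS asset "category", pvGetS asset "filename"))

theorem pv_key_lt_iff (pr : List String) (a b : List (String × String)) :
    pvKey pr a < pvKey pr b ↔
      (pvS pr a < pvS pr b ∨ (pvS pr a = pvS pr b ∧
        (pvC a < pvC b ∨ (pvC a = pvC b ∧ pvF a < pvF b)))) := by
  simp [pvKey, pvS, pvC, pvF, Prod.Lex.toLex_lt_toLex]

-- the invariant relating min? over all candidates (lex key) with min2? over the r-bucket
def pvInv (pr : List String) (r : Int)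
    (o1 o2 : Option (List (String × String))) : Prop :=
  (o2 = none ∧ (o1 = none ∨ ∃ m, o1 = some m ∧ r < pvS pr m)) ∨
  (∃ m, o1 = some m ∧ o2 = some m ∧ pvS pr m = r)

def pvStep1 (pr : List String) (o : Option (List (String × String)))
    (a : List (String × String)) : Option (List (String × String)) :=
  match o with
  | none => some a
  | some m => if pvKey pr a < pvKey pr m then some a else some m

def pvStep2 (o : Option (List (String × String)))
    (a : List (String × String)) : Option (List (String × String)) :=
  match o with
  | none => some a
  | some m =>
    if (decide (pvC a < pvC m) || !decide (pvC m < pvC a) && decide (pvF a < pvF m)) = true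
    then some a else some m

theorem pv_min?_eq_foldl (pr : List String) (l : List (List (String × String))) :
    PySem.List.min? l (pvKey pr) = l.foldl (pvStep1 pr) none := by
  unfold PySem.List.min?
  congr 1
  funext o x
  cases o <;> rfl

theorem pv_min2?_eq_foldl (l : List (List (String × String))) :
    PySem.List.min2? l pvC pvF = l.foldl pvStep2 none := by
  unfold PySem.List.min2?
  congr 1
  funext o x
  cases o <;> rfl

theorem pv_tupleLt_iff (pr : List String) (a b : List (String × String)) :
    pvTupleLt pr a b = true ↔ pvKey pr a < pvKey pr b := by
  rw [pv_key_lt_iff]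
  simp [pvTupleLt, pvS, pvC, pvF]

theorem pv_head?_handsort_eq_min? (pr : List String)
    (xs : List (List (String × String))) :
    (xs.foldl (fun acc x => PySem.List.insertBy (pvTupleLt pr) x acc) []).head? =
      PySem.List.min? xs (pvKey pr) := by
  rw [pv_foldl_insertBy_head?, pv_min?_eq_foldl]
  show List.foldl _ none xs = _
  congr 1
  funext o x
  cases o with
  | none => rfl
  | some m =>
    simp only [pvStep1]
    by_cases h : pvKey pr x < pvKey pr m
    · rw [if_pos ((pv_tupleLt_iff pr x m).mpr h), if_pos h]
    · rw [if_neg (fun hh => h ((pv_tupleLt_iff pr x m).mp hh)), if_neg h]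

theorem pv_foldl_step2_some :
    ∀ (l : List (List (String × String))) (m : List (String × String)),
      ∃ m', l.foldl pvStep2 (some m) = some m' := by
  intro l
  induction l with
  | nil => exact fun m => ⟨m, rfl⟩
  | cons a t ih =>
    intro m
    simp only [List.foldl_cons]
    unfold pvStep2
    split <;> [skip; skip] <;> first | exact ih _ | (split <;> exact ih _)

theorem pv_inv_step (pr : List String) (r : Int) (a : List (String × String))
    (ha : r ≤ pvS pr a) (o1 o2 : Option (List (String × String)))
    (h : pvInv pr r o1 o2) :
    pvInv pr r (pvStep1 pr o1 a)
      (if pvS pr a == r then pvStep2 o2 a else o2) := by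
  rcases h with ⟨h2, h1⟩ | ⟨m, hm1, hm2, hmr⟩
  · subst h2
    by_cases har : pvS pr a = r
    · rcases h1 with h1 | ⟨m, hm, hmr⟩
      · subst h1
        right
        exact ⟨a, rfl, by simp [har, pvStep2], har⟩
      · subst hm
        right
        refine ⟨a, ?_, by simp [har, pvStep2], har⟩
        have : pvKey pr a < pvKey pr m := by
          rw [pv_key_lt_iff]; left; omega
        simp [pvStep1, this]
    · have hra : r < pvS pr a := lt_of_le_of_ne ha (fun hh => har hh.symm)
      rw [if_neg (by simpa using har)]
      left
      refine ⟨rfl, ?_⟩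
      rcases h1 with h1 | ⟨m, hm, hmr⟩
      · subst h1; right; exact ⟨a, rfl, hra⟩
      · subst hm
        unfold pvStep1
        right
        by_cases hk : pvKey pr a < pvKey pr m
        · exact ⟨a, by simp [hk], hra⟩
        · exact ⟨m, by simp [hk], hmr⟩
  · subst hm1; subst hm2
    by_cases har : pvS pr a = r
    · rw [if_pos (by simpa using har)]
      right
      have hkey : (pvKey pr a < pvKey pr m) ↔
          (pvC a < pvC m ∨ (pvC a = pvC m ∧ pvF a < pvF m)) := by
        rw [pv_key_lt_iff]
        constructor
        · rintro (hs | ⟨_, hcf⟩)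
          · omega
          · exact hcf
        · intro hcf; right; exact ⟨by omega, hcf⟩
      have hcond : (decide (pvC a < pvC m) || !decide (pvC m < pvC a) && decide (pvF a < pvF m)) = true ↔
          (pvC a < pvC m ∨ (pvC a = pvC m ∧ pvF a < pvF m)) := by
        rcases lt_trichotomy (pvC a) (pvC m) with hc | hc | hc
        · simp [hc]
        · simp [hc]
        · simp [hc, lt_asymm hc, (ne_of_lt hc).symm]
      by_cases hk : pvKey pr a < pvKey pr m
      · refine ⟨a, by simp [pvStep1, hk], ?_, har⟩
        have hb := hcond.mpr (hkey.mp hk)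
        simp only [pvStep2]
        rw [if_pos hb]
      · refine ⟨m, by simp [pvStep1, hk], ?_, hmr⟩
        have hb : ¬ (decide (pvC a < pvC m) || !decide (pvC m < pvC a) && decide (pvF a < pvF m)) = true := by
          rw [hcond]; rw [hkey] at hk; exact hk
        simp only [pvStep2]
        rw [if_neg hb]
    · have hra : r < pvS pr a := lt_of_le_of_ne ha (fun hh => har hh.symm)
      rw [if_neg (by simpa using har)]
      right
      refine ⟨m, ?_, rfl, hmr⟩
      have : ¬ pvKey pr a < pvKey pr m := by
        rw [pv_key_lt_iff]
        rintro (hs | ⟨hs, _⟩) <;> omega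
      simp [pvStep1, this]

theorem pv_foldl_inv (pr : List String) (r : Int) :
    ∀ (l : List (List (String × String))) (o1 o2 : Option (List (String × String))),
      (∀ a ∈ l, r ≤ pvS pr a) → pvInv pr r o1 o2 →
      pvInv pr r (l.foldl (pvStep1 pr) o1)
        (l.foldl (fun o a => if pvS pr a == r then pvStep2 o a else o) o2) := by
  intro l
  induction l with
  | nil => intro o1 o2 _ h; exact h
  | cons a t ih =>
    intro o1 o2 hge h
    simp only [List.foldl_cons]
    exact ih _ _ (fun b hb => hge b (List.mem_cons_of_mem _ hb))
      (pv_inv_step pr r a (hge a List.mem_cons_self) o1 o2 h)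

theorem pv_min?_eq_min2?_filter (pr : List String) (r : Int)
    (cands : List (List (String × String)))
    (hge : ∀ a ∈ cands, r ≤ pvS pr a)
    (hne : cands.filter (fun a => pvS pr a == r) ≠ []) :
    PySem.List.min? cands (pvKey pr) =
      PySem.List.min2? (cands.filter (fun a => pvS pr a == r)) pvC pvF := by
  rw [pv_min?_eq_foldl, pv_min2?_eq_foldl, List.foldl_filter]
  have hinv := pv_foldl_inv pr r cands none none hge (Or.inl ⟨rfl, Or.inl rfl⟩)
  have hsome : ∃ m', cands.foldl (fun o a => if pvS pr a == r then pvStep2 o a else o) none = some m' := by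
    rw [← List.foldl_filter]
    obtain ⟨b, l, hbl⟩ := List.exists_cons_of_ne_nil hne
    rw [hbl]
    simp only [List.foldl_cons]
    exact pv_foldl_step2_some l b
  obtain ⟨m', hm'⟩ := hsome
  rw [hm']
  rcases hinv with ⟨h2, _⟩ | ⟨m, hm1, hm2, _⟩
  · rw [hm'] at h2; cases h2
  · rw [hm'] at hm2
    rw [hm1, hm2]

theorem pv_bucket_loop_eq_min? (pr : List String)
    (cands : List (List (String × String))) :
    ∀ (ranks : List Int), ranks.Pairwise (· < ·) →
      (∀ a ∈ cands, pvS pr a ∈ ranks) →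
      pvBucketLoop pr cands ranks = PySem.List.min? cands (pvKey pr) := by
  intro ranks
  induction ranks with
  | nil =>
    intro _ hcov
    cases cands with
    | nil => rfl
    | cons a t => exact absurd (hcov a List.mem_cons_self) (by simp)
  | cons r rs ih =>
    intro hpw hcov
    rw [List.pairwise_cons] at hpw
    obtain ⟨hlt, hpw'⟩ := hpw
    show (if (cands.filter (fun a => pvS pr a == r)).isEmpty then pvBucketLoop pr cands rs
          else PySem.List.min2? (cands.filter (fun a => pvS pr a == r)) pvC pvF) = _
    by_cases hb : (cands.filter (fun a => pvS pr a == r)).isEmpty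
    · rw [if_pos hb]
      apply ih hpw'
      intro a ha
      rcases List.mem_cons.mp (hcov a ha) with h | h
      · exfalso
        rw [List.isEmpty_iff, List.filter_eq_nil_iff] at hb
        exact hb a ha (by simp [h])
      · exact h
    · rw [if_neg hb]
      have hge : ∀ a ∈ cands, r ≤ pvS pr a := by
        intro a ha
        rcases List.mem_cons.mp (hcov a ha) with h | h
        · exact le_of_eq h.symm
        · exact le_of_lt (hlt _ h)
      have hne : cands.filter (fun a => pvS pr a == r) ≠ [] := by
        rw [List.isEmpty_iff] at hb; exact hb
      exact (pv_min?_eq_min2?_filter pr r cands hge hne).symm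

theorem pv_score_mem (pr : List String) (a : List (String × String)) :
    pvS pr a ∈ PySem.List.pyRange 0 (pr.length : Int) ++ [(pr.length : Int) + 1] := by
  rw [List.mem_append]
  unfold pvS pvCategoryScore
  simp only
  split
  · rename_i p hf
    left
    have hp := List.mem_of_find?_eq_some hf
    rw [PySem.List.mem_enumerate_iff] at hp
    obtain ⟨k, hk, hpk⟩ := hp
    subst hpk
    rw [PySem.List.mem_pyRange_one]
    simp only
    omega
  · right; simp

theorem pv_ranks_pairwise (pr : List String) :
    (PySem.List.pyRange 0 (pr.length : Int) ++ [(pr.length : Int) + 1]).Pairwise (· < ·) := by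
  rw [List.pairwise_append]
  refine ⟨PySem.List.pairwise_lt_pyRange_one _ _, List.pairwise_singleton _ _, ?_⟩
  intro x hx y hy
  rw [PySem.List.mem_pyRange_one] at hx
  simp only [List.mem_singleton] at hy
  omega

-- ===== VERDICT (by name: the statement is the Claim_ definition above) =====
theorem choose_ad_project_library_asset_spec : Claim_equal_choose_ad_project_library_asset := by
  intro assets hook _
  unfold Spec_choose_ad_project_library_asset
  unfold choose_ad_project_library_asset choose_ad_project_library_asset_alt
  by_cases h : assets = []
  · simp [h]
  · simp only [h]
    rw [pv_head?_handsort_eq_min?,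
        pv_bucket_loop_eq_min? (pvPriorities hook) assets _
          (pv_ranks_pairwise _) (fun a _ => pv_score_mem _ a)]
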